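-- pv_equiv track=rewrite | github.com/AdamZhouSE/pythonHomework | Code/CodeRecords/2666/60608/271332.py | tellstory
-- ===== SOURCE A (Python) =====
-- def tellstory(n: int):
--     ans = n - 1
--     t = 1
--     while t < n and 2 * t <= n:
--         ans += t
--         t *= 2
--     ans += n - t
--     return ans
-- ===== SOURCE B (Python) =====
-- def tellstory(n: int):
--     # closed form: the doubling loop sums to t-1, cancelling the final -t,
--     # so the result is (n-1)+(t-1)+(n-t) = 2n-2 for every n
--     return 2 * n - 2
-- ===== Notes on version B (the rewrite author's own statement) =====
-- stated objective: simpler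
-- what changed: Replaced the doubling while-loop with the closed form 2*n-2 (the geometric sum 1+2+...+t/2 = t-1 cancels the trailing -t).
import Mathlib
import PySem

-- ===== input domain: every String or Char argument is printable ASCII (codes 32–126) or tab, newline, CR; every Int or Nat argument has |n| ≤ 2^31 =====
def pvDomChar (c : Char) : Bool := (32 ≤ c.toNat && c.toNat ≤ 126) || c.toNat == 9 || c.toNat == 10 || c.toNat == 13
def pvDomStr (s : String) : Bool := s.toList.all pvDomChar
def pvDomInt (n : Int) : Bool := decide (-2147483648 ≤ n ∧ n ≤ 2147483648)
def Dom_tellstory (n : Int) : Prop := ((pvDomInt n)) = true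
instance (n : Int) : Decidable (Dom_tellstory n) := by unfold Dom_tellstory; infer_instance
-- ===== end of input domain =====

-- B replaces A's doubling loop with the closed form 2*n-2; return value proved equal for all n.

-- ===== PORT A =====
-- the while loop; the '0 < t' conjunct is a totality guard only (t starts at 1 and
-- doubles, so it always holds on reachable states), needed for the termination measure
def tellstoryLoop (n ans t : Int) : Int :=
  if h : 0 < t ∧ t < n ∧ 2 * t ≤ n then
    tellstoryLoop n (ans + t) (2 * t)
  else
    ans + (n - t)
termination_by (n - t).toNat
decreasing_by omega

def tellstory (n : Int) : Int :=
  tellstoryLoop n (n - 1) 1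

-- ===== PORT B =====
def tellstory_alt (n : Int) : Int := 2 * n - 2

-- ===== PRECONDITION & SPEC =====
def Spec_tellstory (n : Int) (out : Int) : Prop := out = tellstory_alt n
instance (n : Int) (out : Int) : Decidable (Spec_tellstory n out) := by unfold Spec_tellstory; infer_instance

-- ===== CLAIM (what is proved, stated in full; the proofs are below) =====
def Claim_equal_tellstory : Prop := ∀ (n : Int), Dom_tellstory n → Spec_tellstory n (tellstory n)

-- ===== LEMMAS AND PROOFS =====
-- loop invariant: each step moves t into ans, so ans + (n - t) is constant
theorem tellstoryLoop_eq (n ans t : Int) : tellstoryLoop n ans t = ans + (n - t) := by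
  fun_induction tellstoryLoop n ans t with
  | case1 ans t h ih => rw [ih]; ring
  | case2 => rfl

-- ===== VERDICT (by name: the statement is the Claim_ definition above) =====
theorem tellstory_spec : Claim_equal_tellstory := by
  intro n _
  unfold Spec_tellstory tellstory tellstory_alt
  rw [tellstoryLoop_eq]; ring
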